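-- pv_equiv track=rewrite | github.com/patricksilveira/Udacity_CS | social_game.py | get_secondary_connections
-- ===== SOURCE A (Python) =====
-- def get_secondary_connections(network, user):
-- 	if user in network:
-- 		primary = network[user][0]
-- 		secondary = []
-- 		for i in primary:
-- 			if i in network:
-- 				for s in network[i][0]:
-- 					if s not in secondary:
-- 						secondary.append(s)
-- 		return secondary
-- 	return None
-- ===== SOURCE B (Python) =====
-- def get_secondary_connections(network, user):
--     if user not in network:
--         return None
--     flat = [s for i in network[user][0] if i in network for s in network[i][0]]
--     return _uniq(flat)
--
-- def _uniq(xs):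
--     # recursive head-filter dedup: keep the head, drop every later copy of it
--     if not xs:
--         return []
--     head = xs[0]
--     return [head] + _uniq([y for y in xs[1:] if y != head])
-- ===== Notes on version B (the rewrite author's own statement) =====
-- stated objective: alternative
-- what changed: B inverts A's structure: an early-return guard, one flat comprehension collecting all secondary connections, and a recursive head-filter dedup (keep the head, remove its later copies from the remainder) instead of A's interleaved membership-test-and-append loop.
import Mathlib
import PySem

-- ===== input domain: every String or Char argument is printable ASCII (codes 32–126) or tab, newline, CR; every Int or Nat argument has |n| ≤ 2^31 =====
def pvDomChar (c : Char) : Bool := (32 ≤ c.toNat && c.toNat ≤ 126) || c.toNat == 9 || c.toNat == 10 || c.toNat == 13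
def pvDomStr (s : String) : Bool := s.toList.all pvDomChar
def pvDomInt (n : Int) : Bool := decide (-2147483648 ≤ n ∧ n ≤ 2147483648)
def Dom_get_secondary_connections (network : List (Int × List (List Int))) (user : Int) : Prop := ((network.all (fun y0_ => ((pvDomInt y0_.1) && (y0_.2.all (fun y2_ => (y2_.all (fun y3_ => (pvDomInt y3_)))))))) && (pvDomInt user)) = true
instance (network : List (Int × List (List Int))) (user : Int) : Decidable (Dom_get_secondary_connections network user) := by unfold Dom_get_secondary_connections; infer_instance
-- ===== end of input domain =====

-- B inverts A's structure: early-return guard, one flat collection pass, then a recursive head-filter dedup; alternative decomposition, same result.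


-- ===== PORT A =====
-- network is a Python dict (association list, first-match lookup).  network[i][0] is
-- ported as (pyGet? w 0).getD []: Python raises IndexError when the value list is
-- empty; exactly those inputs are excluded by Pre_ below.
def get_secondary_connections (network : List (Int × List (List Int))) (user : Int) : Option (List Int) :=
  let d := PySem.Dict.mk network
  match d.get? user with
  | none => none
  | some v =>
    let primary := (PySem.List.pyGet? v 0).getD []
    some (primary.foldl (fun sec i =>
      match d.get? i with
      | none => sec
      | some w =>
        ((PySem.List.pyGet? w 0).getD []).foldl
          (fun sec s => if sec.contains s then sec else sec ++ [s]) sec) [])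

-- ===== PORT B =====
-- _uniq from Source B: keep the head, recursively dedup the tail with the head filtered out.
def pvUniq : List Int → List Int
  | [] => []
  | h :: t => h :: pvUniq (t.filter (fun y => y != h))
termination_by xs => xs.length
decreasing_by
  simp only [List.length_unattach, List.length_cons]
  exact Nat.lt_succ_of_le (le_trans (List.length_filter_le _ _) (by simp))

def get_secondary_connections_alt (network : List (Int × List (List Int))) (user : Int) : Option (List Int) :=
  let d := PySem.Dict.mk network
  if d.contains user then
    -- the nested comprehension [s for i in network[user][0] if i in network for s in network[i][0]]
    let flat := ((PySem.List.pyGet? (d.getD user []) 0).getD []).flatMap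
      (fun i => if d.contains i then (PySem.List.pyGet? (d.getD i []) 0).getD [] else [])
    some (pvUniq flat)
  else none

-- ===== PRECONDITION & SPEC =====
-- Pre_ excludes exactly the inputs where Python A raises IndexError: the looked-up
-- value list of user (or of a primary connection that is a key) is empty.
def Pre_get_secondary_connections (network : List (Int × List (List Int))) (user : Int) : Prop :=
  (((PySem.Dict.mk network).get? user).all (fun v =>
     !v.isEmpty && (v.headD []).all (fun i =>
        ((PySem.Dict.mk network).get? i).all (fun w => !w.isEmpty)))) = true
instance (network : List (Int × List (List Int))) (user : Int) : Decidable (Pre_get_secondary_connections network user) := by unfold Pre_get_secondary_connections; infer_instance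
def pvWitness_get_secondary_connections : (List (Int × List (List Int))) × Int :=
  ([(1, [[2, 3]]), (2, [[4, 4, 5]]), (3, [[5, 6]])], 1)
def Spec_get_secondary_connections (network : List (Int × List (List Int))) (user : Int) (out : Option (List Int)) : Prop := out = get_secondary_connections_alt network user
instance (network : List (Int × List (List Int))) (user : Int) (out : Option (List Int)) : Decidable (Spec_get_secondary_connections network user out) := by unfold Spec_get_secondary_connections; infer_instance

-- ===== CLAIM (what is proved, stated in full; the proofs are below) =====
def Claim_equal_get_secondary_connections : Prop := ∀ (network : List (Int × List (List Int))) (user : Int), Dom_get_secondary_connections network user → Pre_get_secondary_connections network user → Spec_get_secondary_connections network user (get_secondary_connections network user)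

-- ===== LEMMAS AND PROOFS =====

-- the chunk contributed by one primary connection i
def pvChunk (d : PySem.Dict Int (List (List Int))) (i : Int) : List Int :=
  match d.get? i with
  | none => []
  | some w => (PySem.List.pyGet? w 0).getD []

-- A's outer loop body is "fold the chunk in with Set.add"
theorem aStep_eq_chunk (d : PySem.Dict Int (List (List Int))) (sec : List Int) (i : Int) :
    (match d.get? i with
      | none => sec
      | some w =>
        ((PySem.List.pyGet? w 0).getD []).foldl
          (fun sec s => if sec.contains s then sec else sec ++ [s]) sec)
    = (pvChunk d i).foldl PySem.Set.add sec := by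
  have hfun : (fun (sec : List Int) (s : Int) => if sec.contains s then sec else sec ++ [s])
      = PySem.Set.add := by
    funext sec s
    simp [PySem.Set.add]
  unfold pvChunk
  cases d.get? i
  · rfl
  · exact congrFun (congrFun (congrArg List.foldl hfun) sec) _

-- B's comprehension body is the chunk
theorem bBody_eq_chunk (d : PySem.Dict Int (List (List Int))) (i : Int) :
    (if d.contains i then (PySem.List.pyGet? (d.getD i []) 0).getD [] else [])
    = pvChunk d i := by
  unfold pvChunk
  cases h : d.get? i with
  | none =>
    have : d.contains i = false := by
      rw [PySem.Dict.contains_eq_isSome_get?, h]; rfl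
    simp [this]
  | some w =>
    have hc : d.contains i = true := by
      rw [PySem.Dict.contains_eq_isSome_get?, h]; rfl
    rw [if_pos hc, PySem.Dict.getD_of_get?_eq_some d [] h]

-- membership is preserved by Set.add
theorem mem_add_of_mem {x y : Int} {s : List Int} (h : x ∈ s) : x ∈ PySem.Set.add s y := by
  simp [PySem.Set.add]
  split <;> simp [h]

-- folding Set.add over elements all ≠ h commutes with a head h
theorem foldl_add_cons (h : Int) : ∀ (t : List Int) (s : List Int), (∀ y ∈ t, y ≠ h) →
    List.foldl PySem.Set.add (h :: s) t = h :: List.foldl PySem.Set.add s t := by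
  intro t
  induction t with
  | nil => intro s _; rfl
  | cons a t ih =>
    intro s hne
    have ha : a ≠ h := hne a (by simp)
    have hstep : PySem.Set.add (h :: s) a = h :: PySem.Set.add s a := by
      simp [PySem.Set.add, PySem.Set.contains, ha]
      split <;> simp
    simp only [List.foldl_cons, hstep]
    exact ih _ (fun y hy => hne y (by simp [hy]))

-- elements already present may be filtered out before folding Set.add
theorem foldl_add_filter (h : Int) : ∀ (t : List Int) (s : List Int), h ∈ s →
    List.foldl PySem.Set.add s t = List.foldl PySem.Set.add s (t.filter (fun y => y != h)) := by
  intro t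
  induction t with
  | nil => intro s _; rfl
  | cons a t ih =>
    intro s hs
    by_cases ha : a = h
    · subst ha
      have : PySem.Set.add s a = s := by
        simp [PySem.Set.add, PySem.Set.contains]
        exact hs
      simp only [List.foldl_cons, this, List.filter_cons]
      simp only [bne_self_eq_false, Bool.false_eq_true, if_false]
      exact ih s hs
    · have : (a != h) = true := by simp [ha]
      simp only [List.foldl_cons, List.filter_cons, this, if_true]
      exact ih (PySem.Set.add s a) (mem_add_of_mem hs)

-- the recursive head-filter dedup computes first-occurrence dedup
theorem pvUniq_eq_ofList : ∀ (xs : List Int), pvUniq xs = PySem.Set.ofList xs := by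
  intro xs
  induction hn : xs.length using Nat.strong_induction_on generalizing xs with
  | _ n ih =>
    cases xs with
    | nil => simp [pvUniq, PySem.Set.ofList]
    | cons h t =>
      have hfil : ∀ y ∈ t.filter (fun y => y != h), y ≠ h := by
        intro y hy
        have := List.of_mem_filter hy
        simpa using this
      have hlen : (t.filter (fun y => y != h)).length < n := by
        subst hn
        simp only [List.length_cons]
        exact Nat.lt_succ_of_le (List.length_filter_le _ _)
      have hofl : PySem.Set.ofList (h :: t)
          = h :: PySem.Set.ofList (t.filter (fun y => y != h)) := by
        rw [PySem.Set.ofList_eq_foldl, PySem.Set.ofList_eq_foldl]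
        have h1 : List.foldl PySem.Set.add [] (h :: t)
            = List.foldl PySem.Set.add [h] t := by rfl
        rw [h1, foldl_add_filter h t [h] (by simp),
            foldl_add_cons h _ [] hfil]
      rw [pvUniq, hofl, ih _ hlen _ rfl]

-- ===== VERDICT (by name: the statement is the Claim_ definition above) =====
theorem get_secondary_connections_spec : Claim_equal_get_secondary_connections := by
  intro network user _ _
  unfold Spec_get_secondary_connections get_secondary_connections get_secondary_connections_alt
  cases h : (PySem.Dict.mk network).get? user with
  | none =>
    have : (PySem.Dict.mk network).contains user = false := by
      rw [PySem.Dict.contains_eq_isSome_get?, h]; rfl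
    simp [h, this]
  | some v =>
    have hc : (PySem.Dict.mk network).contains user = true := by
      rw [PySem.Dict.contains_eq_isSome_get?, h]; rfl
    simp only [h, hc, if_true]
    set d := PySem.Dict.mk network
    rw [PySem.Dict.getD_of_get?_eq_some d [] h]
    congr 1
    set primary := (PySem.List.pyGet? v 0).getD []
    have hA : primary.foldl (fun sec i =>
        match d.get? i with
        | none => sec
        | some w =>
          ((PySem.List.pyGet? w 0).getD []).foldl
            (fun sec s => if sec.contains s then sec else sec ++ [s]) sec) []
        = primary.foldl (fun sec i => (pvChunk d i).foldl PySem.Set.add sec) [] :=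
      PySem.List.foldl_congr_mem _ _ _ _ (fun sec i _ => aStep_eq_chunk d sec i)
    have hB : primary.flatMap
        (fun i => if d.contains i then (PySem.List.pyGet? (d.getD i []) 0).getD [] else [])
        = primary.flatMap (pvChunk d) := by
      apply List.flatMap_congr ?_
      intro i _
      exact bBody_eq_chunk d i
    rw [hA, hB, pvUniq_eq_ofList]
    rw [PySem.Set.ofList_eq_foldl]
    rw [List.flatMap_def, List.foldl_flatten, List.foldl_map]
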